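-- pv_equiv track=rewrite | github.com/delvechioblackson-dev/forex-trading-dashboard | signals.py | combine_signal_types
-- ===== SOURCE A (Python) =====
-- def join_human_readable(items):
--     cleaned_items = [str(item).strip() for item in items if str(item).strip()]
--     if not cleaned_items:
--         return ""
--     if len(cleaned_items) == 1:
--         return cleaned_items[0]
--     if len(cleaned_items) == 2:
--         return f"{cleaned_items[0]} en {cleaned_items[1]}"
--     return f"{', '.join(cleaned_items[:-1])} en {cleaned_items[-1]}"
--
-- def combine_signal_types(signal_types):
--     unique_types = list(dict.fromkeys(str(signal_type).strip() for signal_type in signal_types if str(signal_type).strip()))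
--     if not unique_types:
--         return ""
--     if len(unique_types) == 1:
--         return unique_types[0]
--
--     split_types = [signal_type.split() for signal_type in unique_types]
--     prefix_length = 0
--     for word_group in zip(*split_types):
--         if len(set(word_group)) == 1:
--             prefix_length += 1
--         else:
--             break
--
--     if prefix_length == 0:
--         return join_human_readable(unique_types)
--
--     prefix = " ".join(split_types[0][:prefix_length])
--     suffixes = [" ".join(words[prefix_length:]).strip() for words in split_types]
--     if not all(suffixes):
--         return join_human_readable(unique_types)
--
--     return f"{prefix} {join_human_readable(suffixes)}"
-- ===== SOURCE B (Python) =====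
-- def _human_join(items):
--     if len(items) == 1:
--         return items[0]
--     return ", ".join(items[:-1]) + " en " + items[-1]
--
-- def combine_signal_types(signal_types):
--     unique = []
--     seen = set()
--     for raw in signal_types:
--         cleaned = str(raw).strip()
--         if cleaned and cleaned not in seen:
--             seen.add(cleaned)
--             unique.append(cleaned)
--     if len(unique) <= 1:
--         return unique[0] if unique else ""
--     splits = [t.split() for t in unique]
--     common = splits[0]
--     for words in splits[1:]:
--         n = 0
--         while n < len(common) and n < len(words) and common[n] == words[n]:
--             n += 1
--         common = common[:n]
--     k = len(common)
--     if k and all(len(words) > k for words in splits):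
--         return " ".join(common) + " " + _human_join([" ".join(words[k:]) for words in splits])
--     return _human_join(unique)
-- ===== Notes on version B (the rewrite author's own statement) =====
-- stated objective: alternative
-- what changed: B replaces A's dict.fromkeys dedup with an explicit seen-list loop, replaces the zip(*split_types) column-by-column set-equality scan with a pairwise running common-word-prefix fold (first-mismatch index per list), tests suffix existence arithmetically (len(words) > k) instead of building and truth-testing stripped suffix strings, and joins with a simplified helper that skips A's re-cleaning pass.
import Mathlib
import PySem

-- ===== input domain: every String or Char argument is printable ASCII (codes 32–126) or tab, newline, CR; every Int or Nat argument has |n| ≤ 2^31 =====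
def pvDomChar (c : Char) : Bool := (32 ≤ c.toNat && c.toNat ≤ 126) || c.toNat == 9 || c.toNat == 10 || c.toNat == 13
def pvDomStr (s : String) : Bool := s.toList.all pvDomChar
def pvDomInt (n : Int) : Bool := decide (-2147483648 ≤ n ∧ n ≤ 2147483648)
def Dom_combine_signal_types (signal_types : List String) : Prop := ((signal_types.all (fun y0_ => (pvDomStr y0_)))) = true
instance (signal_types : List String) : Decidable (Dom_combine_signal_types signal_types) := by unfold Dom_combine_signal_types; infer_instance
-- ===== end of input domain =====

-- B replaces A's column-by-column zip(*...) scan with a pairwise running common-word-prefix fold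
-- and tests suffix existence arithmetically (objective: alternative decomposition, similar cost).

-- ===== PORT A =====

-- len(set(word_group)) == 1
def pvAllEq (g : List String) : Bool := (PySem.Set.ofList g).length == 1

-- zip(*split_types): columns up to the shortest list
def pvZipStar (ls : List (List String)) : List (List String) :=
  match (ls.map List.length).min? with
  | none => []
  | some n => (List.range n).map (fun i => ls.map (fun l => l.getD i ""))

-- the prefix_length loop with its break
def pvPrefLoop : List (List String) → Nat
  | [] => 0
  | g :: rest => if pvAllEq g then pvPrefLoop rest + 1 else 0

def join_human_readable (items : List String) : String :=
  let cleaned := (items.map (fun item => PySem.Str.strip item)).filter (fun s => s != "")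
  if cleaned.length = 0 then ""
  else if cleaned.length = 1 then cleaned.headI
  else if cleaned.length = 2 then cleaned.headI ++ " en " ++ cleaned.getD 1 ""
  else PySem.Str.join ", " cleaned.dropLast ++ " en " ++ cleaned.getLastD ""

def combine_signal_types (signal_types : List String) : String :=
  let unique_types := PySem.List.dedup
    ((signal_types.map (fun s => PySem.Str.strip s)).filter (fun s => s != ""))
  if unique_types.length = 0 then ""
  else if unique_types.length = 1 then unique_types.headI
  else
    let split_types := unique_types.map (fun t => PySem.Str.split₀ t)
    let prefix_length := pvPrefLoop (pvZipStar split_types)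
    if prefix_length = 0 then join_human_readable unique_types
    else
      let pfx := PySem.Str.join " " (split_types.headI.take prefix_length)
      let suffixes := split_types.map
        (fun words => PySem.Str.strip (PySem.Str.join " " (words.drop prefix_length)))
      if !(suffixes.all (fun s => s != "")) then join_human_readable unique_types
      else pfx ++ " " ++ join_human_readable suffixes

-- ===== PORT B =====

-- the while loop: index of the first mismatch of two word lists
def pvMismatch : List String → List String → Nat
  | x :: xs, y :: ys => if x == y then pvMismatch xs ys + 1 else 0
  | _, _ => 0

-- the dedup loop of B: unique list + seen set
def pvDedup : List String → List String → PySem.Set String → List String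
  | [], unique, _ => unique
  | raw :: rest, unique, seen =>
    let cleaned := PySem.Str.strip raw
    if cleaned != "" && !(PySem.Set.contains seen cleaned) then
      pvDedup rest (unique ++ [cleaned]) (PySem.Set.add seen cleaned)
    else pvDedup rest unique seen

def pvHumanJoin (items : List String) : String :=
  if items.length = 1 then items.headI
  else PySem.Str.join ", " items.dropLast ++ " en " ++ items.getLastD ""

def combine_signal_types_alt (signal_types : List String) : String :=
  let unique := pvDedup signal_types [] PySem.Set.empty
  if unique.length ≤ 1 then unique.headI
  else
    let splits := unique.map (fun t => PySem.Str.split₀ t)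
    let common := splits.tail.foldl (fun c w => c.take (pvMismatch c w)) splits.headI
    let k := common.length
    if decide (k ≠ 0) && splits.all (fun w => decide (k < w.length)) then
      PySem.Str.join " " common ++ " " ++
        pvHumanJoin (splits.map (fun w => PySem.Str.join " " (w.drop k)))
    else pvHumanJoin unique

-- ===== PRECONDITION & SPEC =====
def Spec_combine_signal_types (signal_types : List String) (out : String) : Prop := out = combine_signal_types_alt signal_types
instance (signal_types : List String) (out : String) : Decidable (Spec_combine_signal_types signal_types out) := by unfold Spec_combine_signal_types; infer_instance

-- ===== CLAIM (what is proved, stated in full; the proofs are below) =====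
def Claim_equal_combine_signal_types : Prop := ∀ (signal_types : List String), Dom_combine_signal_types signal_types → Spec_combine_signal_types signal_types (combine_signal_types signal_types)

-- ===== LEMMAS AND PROOFS =====

-- ---- the dedup loops agree ----
theorem uniq_pair (l : List String) (u : List String) (s : PySem.Set String) (hus : u = s) :
    pvDedup l u s =
    l.foldl (fun u raw =>
      let cleaned := PySem.Str.strip raw
      if cleaned != "" && !(u.contains cleaned) then u ++ [cleaned] else u) u := by
  induction l generalizing u s with
  | nil => rfl
  | cons raw l ih =>
    subst hus
    simp only [pvDedup, List.foldl_cons]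
    rw [show PySem.Set.contains u (PySem.Str.strip raw) =
          u.contains (PySem.Str.strip raw) from rfl]
    by_cases h : (PySem.Str.strip raw != "" && !(u.contains (PySem.Str.strip raw))) = true
    · have hcont : u.contains (PySem.Str.strip raw) = false := by
        rcases Bool.and_eq_true_iff.mp h with ⟨_, h2⟩
        simpa using h2
      have hadd : PySem.Set.add u (PySem.Str.strip raw) = u ++ [PySem.Str.strip raw] := by
        simp only [PySem.Set.add, PySem.Set.contains]
        rw [if_neg]
        simpa using hcont
      rw [if_pos h, if_pos h, hadd]
      exact ih _ _ rfl
    · rw [if_neg h, if_neg h]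
      exact ih _ _ rfl

theorem uniq_eq (sts : List String) :
    sts.foldl (fun u raw =>
      let cleaned := PySem.Str.strip raw
      if cleaned != "" && !(u.contains cleaned) then u ++ [cleaned] else u) [] =
    PySem.List.dedup ((sts.map (fun s => PySem.Str.strip s)).filter (fun s => s != "")) := by
  rw [PySem.List.dedup_eq_ofList, PySem.Set.ofList_eq_foldl,
    ← PySem.List.foldl_if_eq_foldl_filter (p := fun s => s != "") (f := PySem.Set.add),
    List.foldl_map]
  apply PySem.List.foldl_congr_mem
  intro u raw _
  simp only []
  by_cases h1 : PySem.Str.strip raw != ""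
  · simp [h1, PySem.Set.add, PySem.Set.contains]
  · simp [h1]


-- ---- dropWhile / strip toolbox ----
theorem dropWhile_head_false {p : Char → Bool} (l : List Char) :
    ∀ c, (l.dropWhile p).head? = some c → p c = false := by
  induction l with
  | nil => intro c hc; simp at hc
  | cons a l ih =>
    intro c hc
    rw [List.dropWhile_cons] at hc
    by_cases h : p a
    · exact ih c (by simpa [h] using hc)
    · rw [if_neg (by simpa using h)] at hc
      simp at hc
      subst hc
      simpa using h

theorem dropWhile_eq_self_of_head {p : Char → Bool} (l : List Char)
    (h : ∀ c, l.head? = some c → p c = false) : l.dropWhile p = l := by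
  cases l with
  | nil => rfl
  | cons a l => rw [List.dropWhile_cons]; simp [h a rfl]

theorem rstrip_append_eq (l : List Char) : ∃ t, l = PySem.Chars.rstrip l ++ t := by
  refine ⟨(l.reverse.takeWhile PySem.Chars.isspace).reverse, ?_⟩
  simp only [PySem.Chars.rstrip]
  rw [← List.reverse_append, List.takeWhile_append_dropWhile, List.reverse_reverse]

theorem head_false_rstrip (l : List Char)
    (h : ∀ c, l.head? = some c → PySem.Chars.isspace c = false) :
    ∀ c, (PySem.Chars.rstrip l).head? = some c → PySem.Chars.isspace c = false := by
  intro c hc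
  obtain ⟨t, ht⟩ := rstrip_append_eq l
  apply h
  rw [ht, List.head?_append, hc]
  rfl

theorem rstrip_eq_self_of_rev_head (l : List Char)
    (h : ∀ c, l.reverse.head? = some c → PySem.Chars.isspace c = false) :
    PySem.Chars.rstrip l = l := by
  simp [PySem.Chars.rstrip, dropWhile_eq_self_of_head _ h]

theorem rstrip_rstrip (l : List Char) :
    PySem.Chars.rstrip (PySem.Chars.rstrip l) = PySem.Chars.rstrip l := by
  apply rstrip_eq_self_of_rev_head
  intro c hc
  have hrev : (PySem.Chars.rstrip l).reverse = l.reverse.dropWhile PySem.Chars.isspace := by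
    simp [PySem.Chars.rstrip]
  rw [hrev] at hc
  exact dropWhile_head_false _ c hc

theorem chars_strip_idem (cs : List Char) :
    PySem.Chars.strip (PySem.Chars.strip cs) = PySem.Chars.strip cs := by
  have hhead : ∀ c, (PySem.Chars.strip cs).head? = some c → PySem.Chars.isspace c = false := by
    simp only [PySem.Chars.strip]
    exact head_false_rstrip _ (by
      simp only [PySem.Chars.lstrip]
      exact fun c hc => dropWhile_head_false _ c hc)
  simp only [PySem.Chars.strip] at hhead ⊢
  rw [show PySem.Chars.lstrip (PySem.Chars.rstrip (PySem.Chars.lstrip cs)) =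
        PySem.Chars.rstrip (PySem.Chars.lstrip cs) from by
    simp only [PySem.Chars.lstrip]
    exact dropWhile_eq_self_of_head _ hhead]
  exact rstrip_rstrip _

-- ---- join facts ----
theorem chars_join_ne_nil (w : List Char) (rest : List (List Char)) (hw : w ≠ []) :
    PySem.Chars.join [' '] (w :: rest) ≠ [] := by
  cases rest with
  | nil => simpa [PySem.Chars.join_singleton] using hw
  | cons v rest => rw [PySem.Chars.join_cons_cons]; simp [hw]

theorem chars_join_head (w : List Char) (rest : List (List Char)) (hw : w ≠ []) :
    (PySem.Chars.join [' '] (w :: rest)).head? = w.head? := by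
  cases rest with
  | nil => rw [PySem.Chars.join_singleton]
  | cons v rest =>
    rw [PySem.Chars.join_cons_cons, List.append_assoc, List.head?_append]
    cases w with
    | nil => exact absurd rfl hw
    | cons a w => rfl

theorem chars_join_rev_head (ws : List (List Char))
    (h : ∀ w ∈ ws, w ≠ [] ∧ ∀ c ∈ w, PySem.Chars.isspace c = false) :
    ∀ c, (PySem.Chars.join [' '] ws).reverse.head? = some c →
      PySem.Chars.isspace c = false := by
  induction ws with
  | nil => intro c hc; simp [PySem.Chars.join_nil] at hc
  | cons w rest ih =>
    intro c hc
    cases rest with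
    | nil =>
      rw [PySem.Chars.join_singleton] at hc
      cases hwr : w.reverse with
      | nil => rw [hwr] at hc; simp at hc
      | cons a t =>
        rw [hwr] at hc
        have hac : a = c := by simpa using hc
        subst hac
        have hcm : a ∈ w := by
          rw [← List.mem_reverse, hwr]
          exact List.mem_cons_self
        exact (h w (by simp)).2 a hcm
    | cons v rest2 =>
      rw [PySem.Chars.join_cons_cons, List.reverse_append, List.reverse_append,
        List.head?_append] at hc
      have hne : PySem.Chars.join [' '] (v :: rest2) ≠ [] :=
        chars_join_ne_nil v rest2 (h v (by simp)).1
      cases hcase : (PySem.Chars.join [' '] (v :: rest2)).reverse.head? with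
      | none =>
        rw [List.head?_eq_none_iff] at hcase
        exact absurd (by simpa using hcase) hne
      | some d =>
        rw [hcase] at hc
        have hdc : d = c := by simpa using hc
        exact ih (fun u hu => h u (by simp [hu])) c (hdc ▸ hcase)

theorem chars_strip_join (w : List Char) (rest : List (List Char))
    (h : ∀ u ∈ w :: rest, u ≠ [] ∧ ∀ c ∈ u, PySem.Chars.isspace c = false) :
    PySem.Chars.strip (PySem.Chars.join [' '] (w :: rest)) =
      PySem.Chars.join [' '] (w :: rest) := by
  have hw : w ≠ [] := (h w (by simp)).1
  have hl : PySem.Chars.lstrip (PySem.Chars.join [' '] (w :: rest)) =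
      PySem.Chars.join [' '] (w :: rest) := by
    simp only [PySem.Chars.lstrip]
    apply dropWhile_eq_self_of_head
    intro c hc
    rw [chars_join_head w rest hw] at hc
    cases w with
    | nil => exact absurd rfl hw
    | cons a w' =>
      have hac : a = c := by simpa using hc
      subst hac
      exact (h (a :: w') (by simp)).2 a (by simp)
  have hr := rstrip_eq_self_of_rev_head _ (chars_join_rev_head (w :: rest) h)
  simp only [PySem.Chars.strip, hl, hr]

theorem str_join_singleton (sep a : String) : PySem.Str.join sep [a] = a := by
  apply String.ext
  simp [PySem.Str.toList_join, PySem.Chars.join_singleton]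

-- ---- words of split(): nonempty, no whitespace ----
def pvWordOk (w : String) : Prop := w.toList ≠ [] ∧ ∀ c ∈ w.toList, PySem.Chars.isspace c = false

theorem split_words_ok (s : String) : ∀ w ∈ PySem.Str.split₀ s, pvWordOk w := by
  have go_ok : ∀ (cs : List Char) (cur : List Char) (acc : List (List Char)),
      (∀ c ∈ cur, PySem.Chars.isspace c = false) →
      (∀ w ∈ acc, w ≠ [] ∧ ∀ c ∈ w, PySem.Chars.isspace c = false) →
      ∀ w ∈ PySem.Chars.split₀.go cs cur acc,
        w ≠ [] ∧ ∀ c ∈ w, PySem.Chars.isspace c = false := by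
    intro cs
    induction cs with
    | nil =>
      intro cur acc hc ha w hw
      rw [PySem.Chars.split₀.go] at hw
      by_cases hcur : cur.isEmpty
      · rw [if_pos hcur] at hw
        exact ha w (by simpa using hw)
      · rw [if_neg hcur] at hw
        rw [List.mem_reverse] at hw
        rcases List.mem_cons.mp hw with rfl | h2
        · refine ⟨by simpa using (by simpa using hcur : ¬ cur = []), ?_⟩
          intro c hcm
          exact hc c (by simpa using hcm)
        · exact ha w h2
    | cons c rest ih =>
      intro cur acc hc ha w hw
      rw [PySem.Chars.split₀.go] at hw
      by_cases hsp : PySem.Chars.isspace c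
      · rw [if_pos hsp] at hw
        by_cases hcur : cur.isEmpty
        · rw [if_pos hcur] at hw
          exact ih [] acc (by simp) ha w hw
        · rw [if_neg hcur] at hw
          refine ih [] _ (by simp) ?_ w hw
          intro u hu
          rcases List.mem_cons.mp hu with rfl | h2
          · refine ⟨by simpa using (by simpa using hcur : ¬ cur = []), ?_⟩
            intro d hd
            exact hc d (by simpa using hd)
          · exact ha u h2
      · rw [if_neg hsp] at hw
        refine ih (c :: cur) acc ?_ ha w hw
        intro d hd
        rcases List.mem_cons.mp hd with rfl | h2
        · simpa using hsp
        · exact hc d h2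
  intro w hw
  have hmem : w.toList ∈ PySem.Chars.split₀ s.toList := by
    rw [← PySem.Str.split₀_map_toList]
    exact List.mem_map_of_mem hw
  have := go_ok s.toList [] [] (by simp) (by simp) w.toList (by
    simpa [PySem.Chars.split₀] using hmem)
  exact this

-- ---- strip facts ----
theorem strip_strip (s : String) : PySem.Str.strip (PySem.Str.strip s) = PySem.Str.strip s := by
  apply String.ext
  simp [PySem.Str.toList_strip, chars_strip_idem]

theorem join_nil_str : PySem.Str.join " " [] = "" := by
  apply String.ext
  simp [PySem.Str.toList_join, PySem.Chars.join_nil]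

theorem strip_empty : PySem.Str.strip "" = "" := by
  apply String.ext
  simp [PySem.Str.toList_strip, PySem.Chars.strip, PySem.Chars.lstrip, PySem.Chars.rstrip]

theorem strip_join (ws : List String) (hw : ∀ w ∈ ws, pvWordOk w) (hne : ws ≠ []) :
    PySem.Str.strip (PySem.Str.join " " ws) = PySem.Str.join " " ws ∧
      PySem.Str.join " " ws ≠ "" := by
  cases ws with
  | nil => exact absurd rfl hne
  | cons w rest =>
    have hprops : ∀ u ∈ (w :: rest).map String.toList,
        u ≠ [] ∧ ∀ c ∈ u, PySem.Chars.isspace c = false := by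
      intro u hu
      obtain ⟨x, hx, rfl⟩ := List.mem_map.mp hu
      exact ⟨(hw x hx).1, (hw x hx).2⟩
    have hJ : (PySem.Str.join " " (w :: rest)).toList =
        PySem.Chars.join [' '] (w.toList :: rest.map String.toList) := by
      rw [PySem.Str.toList_join]
      rfl
    constructor
    · apply String.ext
      rw [PySem.Str.toList_strip, hJ]
      exact chars_strip_join _ _ (by simpa using hprops)
    · intro hcon
      have : (PySem.Str.join " " (w :: rest)).toList = [] := by rw [hcon]; rfl
      rw [hJ] at this
      exact chars_join_ne_nil _ _ (by simpa using (hw w (by simp)).1) this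

-- ---- join_human_readable on already-clean lists is the simple join ----
theorem jhr_eq (items : List String) (hne : items ≠ [])
    (h : ∀ x ∈ items, x ≠ "" ∧ PySem.Str.strip x = x) :
    join_human_readable items = pvHumanJoin items := by
  have hclean : (items.map (fun item => PySem.Str.strip item)).filter (fun s => s != "") = items := by
    rw [show items.map (fun item => PySem.Str.strip item) = items from by
      conv_rhs => rw [← List.map_id items]
      exact List.map_congr_left (fun x hx => (h x hx).2)]
    rw [List.filter_eq_self]
    intro a ha
    simpa using (h a ha).1
  unfold join_human_readable pvHumanJoin
  simp only [hclean]
  cases items with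
  | nil => exact absurd rfl hne
  | cons a rest =>
    cases rest with
    | nil => simp
    | cons b rest2 =>
      cases rest2 with
      | nil => simp [str_join_singleton]
      | cons d rest3 => simp

-- ---- pvMismatch / common-prefix fold facts ----
theorem mismatch_prefix_right (xs ys : List String) :
    xs.take (pvMismatch xs ys) <+: ys := by
  induction xs generalizing ys with
  | nil => simp [pvMismatch]
  | cons x xs ih =>
    cases ys with
    | nil => simp [pvMismatch]
    | cons y ys =>
      by_cases h : x == y
      · have hxy : x = y := by simpa using h
        simp only [pvMismatch, if_pos h, List.take_succ_cons]
        exact List.cons_prefix_cons.mpr ⟨hxy, ih ys⟩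
      · simp [pvMismatch, h]

theorem mismatch_max (c xs ys : List String) (h1 : c <+: xs) (h2 : c <+: ys) :
    c <+: xs.take (pvMismatch xs ys) := by
  induction c generalizing xs ys with
  | nil => exact List.nil_prefix
  | cons a c ih =>
    cases xs with
    | nil => simp at h1
    | cons x xs =>
      cases ys with
      | nil => simp at h2
      | cons y ys =>
        obtain ⟨rfl, h1x⟩ := List.cons_prefix_cons.mp h1
        obtain ⟨rfl, h2x⟩ := List.cons_prefix_cons.mp h2
        simp only [pvMismatch, BEq.rfl, if_pos, List.take_succ_cons]
        exact List.cons_prefix_cons.mpr ⟨rfl, ih xs ys h1x h2x⟩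

theorem common_prefix_init (ts : List (List String)) (c : List String) :
    ts.foldl (fun c w => c.take (pvMismatch c w)) c <+: c := by
  induction ts generalizing c with
  | nil => exact List.prefix_refl c
  | cons w ts ih =>
    exact (ih (c.take (pvMismatch c w))).trans (List.take_prefix _ _)

theorem common_prefix_mem (ts : List (List String)) (c : List String) :
    ∀ w ∈ ts, ts.foldl (fun c w => c.take (pvMismatch c w)) c <+: w := by
  induction ts generalizing c with
  | nil => intro w hw; simp at hw
  | cons w ts ih =>
    intro w2 hw2
    rcases List.mem_cons.mp hw2 with rfl | hw3
    · exact (common_prefix_init ts _).trans (mismatch_prefix_right c w2)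
    · exact ih _ w2 hw3

theorem common_max (ts : List (List String)) (c d : List String) (h1 : d <+: c)
    (h2 : ∀ w ∈ ts, d <+: w) : d <+: ts.foldl (fun c w => c.take (pvMismatch c w)) c := by
  induction ts generalizing c with
  | nil => exact h1
  | cons w ts ih =>
    exact ih _ (mismatch_max d c w h1 (h2 w (by simp))) (fun w2 hw2 => h2 w2 (by simp [hw2]))

-- ---- pvPrefLoop spec ----
theorem prefLoop_le_length (cols : List (List String)) : pvPrefLoop cols ≤ cols.length := by
  induction cols with
  | nil => simp [pvPrefLoop]
  | cons g rest ih =>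
    simp only [pvPrefLoop, List.length_cons]
    split
    · omega
    · omega

theorem prefLoop_true (cols : List (List String)) :
    ∀ j < pvPrefLoop cols, pvAllEq (cols.getD j []) = true := by
  induction cols with
  | nil => intro j hj; simp [pvPrefLoop] at hj
  | cons g rest ih =>
    intro j hj
    simp only [pvPrefLoop] at hj
    split at hj
    · cases j with
      | zero => simpa using ‹pvAllEq g = true›
      | succ j => simpa using ih j (by omega)
    · omega

theorem prefLoop_stop (cols : List (List String)) (h : pvPrefLoop cols < cols.length) :
    pvAllEq (cols.getD (pvPrefLoop cols) []) = false := by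
  induction cols with
  | nil => simp [pvPrefLoop] at h
  | cons g rest ih =>
    simp only [pvPrefLoop, List.length_cons] at h ⊢
    split
    · rename_i hg
      simp only [hg, if_pos] at h
      simpa using ih (by omega)
    · simpa using ‹¬ pvAllEq g = true›

theorem allEq_of (x : String) (gs : List String) (h : ∀ y ∈ x :: gs, y = x) :
    pvAllEq (x :: gs) = true := by
  have key : ∀ gs2 : List String, (∀ y ∈ gs2, y = x) → gs2.foldl PySem.Set.add [x] = [x] := by
    intro gs2 hgs2
    induction gs2 with
    | nil => rfl
    | cons y ys ih =>
      have hy : y = x := hgs2 y (by simp)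
      subst hy
      have hadd : PySem.Set.add [y] y = [y] := by simp [PySem.Set.add, PySem.Set.contains]
      rw [List.foldl_cons, hadd]
      exact ih (fun z hz => hgs2 z (by simp [hz]))
  have h0 : PySem.Set.ofList (x :: gs) = [x] := by
    rw [PySem.Set.ofList_eq_foldl, List.foldl_cons]
    have hadd : PySem.Set.add [] x = [x] := by simp [PySem.Set.add, PySem.Set.contains]
    rw [hadd]
    exact key gs (fun y hy => h y (by simp [hy]))
  simp [pvAllEq, h0]

theorem of_allEq (g : List String) (h : pvAllEq g = true) :
    ∀ y ∈ g, ∀ z ∈ g, y = z := by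
  simp only [pvAllEq, beq_iff_eq] at h
  obtain ⟨a, ha⟩ := List.length_eq_one_iff.mp h
  intro y hy z hz
  have hy2 : y ∈ PySem.Set.ofList g := (PySem.Set.mem_ofList g y).mpr hy
  have hz2 : z ∈ PySem.Set.ofList g := (PySem.Set.mem_ofList g z).mpr hz
  rw [ha] at hy2 hz2
  simp at hy2 hz2
  rw [hy2, hz2]

-- ---- the two prefix-length computations agree ----
theorem prefix_len_eq (t : List String) (ts : List (List String)) :
    pvPrefLoop (pvZipStar (t :: ts)) =
      (ts.foldl (fun c w => c.take (pvMismatch c w)) t).length := by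
  obtain ⟨n, hn⟩ : ∃ n, ((t :: ts).map List.length).min? = some n := by
    cases h : ((t :: ts).map List.length).min? with
    | none => simp at h
    | some n => exact ⟨n, rfl⟩
  obtain ⟨hnmem, hnle⟩ := List.min?_eq_some_iff.mp hn
  have hlen : ∀ l ∈ t :: ts, n ≤ l.length := fun l hl => hnle _ (List.mem_map_of_mem hl)
  have hzip : pvZipStar (t :: ts) =
      (List.range n).map (fun i => (t :: ts).map (fun l => l.getD i "")) := by
    unfold pvZipStar
    rw [hn]
  set cols := (List.range n).map (fun i => (t :: ts).map (fun l => l.getD i "")) with hcols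
  have hclen : cols.length = n := by simp [hcols]
  set pl := pvPrefLoop cols with hpl
  have hpln : pl ≤ n := hclen ▸ prefLoop_le_length cols
  have hcol : ∀ j, j < n → cols.getD j [] = (t :: ts).map (fun l => l.getD j "") := by
    intro j hj
    rw [hcols, List.getD_eq_getElem _ _ (by simpa using hj), List.getElem_map, List.getElem_range]
  have hAllEq : ∀ j, j < pl → ∀ l ∈ t :: ts, l.getD j "" = t.getD j "" := by
    intro j hj l hl
    have h1 := prefLoop_true cols j hj
    rw [hcol j (lt_of_lt_of_le hj hpln)] at h1
    exact of_allEq _ h1 _ (List.mem_map_of_mem hl) _ (List.mem_map_of_mem (by simp))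
  have hpre : ∀ l ∈ t :: ts, t.take pl <+: l := by
    intro l hl
    have hlen_l : pl ≤ l.length := le_trans hpln (hlen l hl)
    have hlen_t : pl ≤ t.length := le_trans hpln (hlen t (by simp))
    have heq : t.take pl = l.take pl := by
      apply List.ext_getElem
      · simp [hlen_l, hlen_t]
      · intro i h₁ h₂
        rw [List.getElem_take, List.getElem_take]
        have hi : i < pl := by simpa [hlen_t] using h₁
        have hgd := hAllEq i hi l hl
        rw [List.getD_eq_getElem _ _ (lt_of_lt_of_le hi hlen_l),
            List.getD_eq_getElem _ _ (lt_of_lt_of_le hi hlen_t)] at hgd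
        exact hgd.symm
    rw [heq]
    exact List.take_prefix _ _
  set common := ts.foldl (fun c w => c.take (pvMismatch c w)) t with hcommon
  have hcp : ∀ l ∈ t :: ts, common <+: l := by
    intro l hl
    rcases List.mem_cons.mp hl with rfl | h2
    · exact common_prefix_init ts l
    · exact common_prefix_mem ts t l h2
  have hcn : common.length ≤ n := by
    obtain ⟨l0, hl0, hl0len⟩ := List.mem_map.mp hnmem
    exact hl0len ▸ (hcp l0 hl0).length_le
  have h1 : common.length ≤ pl := by
    by_contra hcon
    rw [Nat.not_le] at hcon
    have hpln2 : pl < n := lt_of_lt_of_le hcon hcn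
    have hstop := prefLoop_stop cols (by rwa [hclen])
    rw [hcol pl hpln2] at hstop
    have helem : ∀ y ∈ (t :: ts).map (fun l => l.getD pl ""), y = t.getD pl "" := by
      intro y hy
      obtain ⟨l, hl, rfl⟩ := List.mem_map.mp hy
      have hc_l := hcp l hl
      have hc_t := hcp t (by simp)
      have e1 : l.getD pl "" = common[pl]'hcon := by
        rw [List.getD_eq_getElem _ _ (lt_of_lt_of_le hcon hc_l.length_le)]
        exact (hc_l.getElem hcon).symm
      have e2 : t.getD pl "" = common[pl]'hcon := by
        rw [List.getD_eq_getElem _ _ (lt_of_lt_of_le hcon hc_t.length_le)]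
        exact (hc_t.getElem hcon).symm
      rw [e1, e2]
    have hT : pvAllEq ((t :: ts).map (fun l => l.getD pl "")) = true := by
      rw [List.map_cons]
      exact allEq_of _ _ (by simpa [List.map_cons] using helem)
    rw [hT] at hstop
    cases hstop
  have h2 : pl ≤ common.length := by
    have hfix := common_max ts t (t.take pl) (List.take_prefix _ _)
      (fun w hw => hpre w (by simp [hw]))
    have hfl := hfix.length_le
    rwa [List.length_take, min_eq_left (le_trans hpln (hlen t (by simp)))] at hfl
  rw [hzip]
  omega


theorem all_map_congr {α β : Type} (l : List α) (g : α → β) (p : β → Bool) (q : α → Bool)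
    (h : ∀ x ∈ l, p (g x) = q x) : (l.map g).all p = l.all q := by
  induction l with
  | nil => rfl
  | cons a l ih =>
    simp only [List.map_cons, List.all_cons, h a (by simp),
      ih (fun x hx => h x (by simp [hx]))]

set_option maxHeartbeats 400000 in
theorem post_eq (u v : String) (vs : List String)
    (hUmem : ∀ x ∈ u :: v :: vs, x ≠ "" ∧ PySem.Str.strip x = x) :
    (let split_types := (u :: v :: vs).map (fun t => PySem.Str.split₀ t)
     let prefix_length := pvPrefLoop (pvZipStar split_types)
     if prefix_length = 0 then join_human_readable (u :: v :: vs)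
     else
       let pfx := PySem.Str.join " " (split_types.headI.take prefix_length)
       let suffixes := split_types.map
         (fun words => PySem.Str.strip (PySem.Str.join " " (words.drop prefix_length)))
       if !(suffixes.all (fun s => s != "")) then join_human_readable (u :: v :: vs)
       else pfx ++ " " ++ join_human_readable suffixes) =
    (let splits := (u :: v :: vs).map (fun t => PySem.Str.split₀ t)
     let common := splits.tail.foldl (fun c w => c.take (pvMismatch c w)) splits.headI
     let k := common.length
     if decide (k ≠ 0) && splits.all (fun w => decide (k < w.length)) then
       PySem.Str.join " " common ++ " " ++
         pvHumanJoin (splits.map (fun w => PySem.Str.join " " (w.drop k)))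
     else pvHumanJoin (u :: v :: vs)) := by
  simp only []
  rw [show (u :: v :: vs).map (fun t => PySem.Str.split₀ t) =
        PySem.Str.split₀ u :: (v :: vs).map (fun t => PySem.Str.split₀ t) from rfl,
      List.headI_cons, List.tail_cons]
  set t0 := PySem.Str.split₀ u with ht0
  set tts := (v :: vs).map (fun t => PySem.Str.split₀ t) with htts
  rw [prefix_len_eq t0 tts]
  set common := tts.foldl (fun c w => c.take (pvMismatch c w)) t0 with hcommon
  set k := common.length with hkdef
  by_cases hk0 : k = 0
  · rw [if_pos hk0]
    rw [show (decide (k ≠ 0) && (t0 :: tts).all (fun w => decide (k < w.length))) = false from by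
      simp [hk0]]
    rw [if_neg (by simp)]
    exact jhr_eq _ (by simp) hUmem
  · rw [if_neg hk0]
    have hwords : ∀ w ∈ t0 :: tts, ∀ y ∈ w, pvWordOk y := by
      intro w hw
      rcases List.mem_cons.mp hw with rfl | h2
      · exact split_words_ok u
      · rw [htts] at h2
        obtain ⟨x, _, rfl⟩ := List.mem_map.mp h2
        exact split_words_ok x
    have hsuffix : ∀ w ∈ t0 :: tts,
        ((PySem.Str.strip (PySem.Str.join " " (w.drop k)) != "") = decide (k < w.length)) ∧
        (k < w.length →
          PySem.Str.strip (PySem.Str.join " " (w.drop k)) = PySem.Str.join " " (w.drop k) ∧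
          PySem.Str.join " " (w.drop k) ≠ "") := by
      intro w hw
      by_cases hlw : w.length ≤ k
      · rw [List.drop_eq_nil_of_le hlw, join_nil_str, strip_empty]
        constructor
        · simp
          omega
        · intro hcon
          omega
      · have hklt : k < w.length := by omega
        have hdne : w.drop k ≠ [] := by
          intro hcon
          have hcl := congrArg List.length hcon
          simp at hcl
          omega
        have hdw : ∀ y ∈ w.drop k, pvWordOk y :=
          fun y hy => hwords w hw y (List.mem_of_mem_drop hy)
        obtain ⟨hs1, hs2⟩ := strip_join (w.drop k) hdw hdne
        refine ⟨?_, fun _ => ⟨hs1, hs2⟩⟩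
        rw [hs1]
        simp [hs2, hklt]
    have hallEq : ((t0 :: tts).map
          (fun words => PySem.Str.strip (PySem.Str.join " " (words.drop k)))).all
            (fun s => s != "") =
        (t0 :: tts).all (fun w => decide (k < w.length)) :=
      all_map_congr _ _ _ _ (fun w hw => (hsuffix w hw).1)
    by_cases hall : (t0 :: tts).all (fun w => decide (k < w.length)) = true
    · rw [show (!(((t0 :: tts).map
          (fun words => PySem.Str.strip (PySem.Str.join " " (words.drop k)))).all
            (fun s => s != ""))) = false from by rw [hallEq, hall]; rfl]
      rw [if_neg (by simp)]
      rw [show (decide (k ≠ 0) && (t0 :: tts).all (fun w => decide (k < w.length))) = true from by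
        rw [hall]
        simp [hk0]]
      rw [if_pos rfl]
      have hcomm_take : t0.take k = common := by
        have hp := common_prefix_init tts t0
        rw [List.prefix_iff_eq_take] at hp
        rw [← hcommon] at hp
        exact hp.symm
      rw [hcomm_take]
      have hsufmap : (t0 :: tts).map
            (fun words => PySem.Str.strip (PySem.Str.join " " (words.drop k))) =
          (t0 :: tts).map (fun w => PySem.Str.join " " (w.drop k)) := by
        apply List.map_congr_left
        intro w hw
        have hk2 : k < w.length := by
          simpa using List.all_eq_true.mp hall w hw
        exact ((hsuffix w hw).2 hk2).1
      rw [hsufmap]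
      refine congrArg (fun z => PySem.Str.join " " common ++ " " ++ z) ?_
      apply jhr_eq
      · simp
      · intro x hx
        obtain ⟨w, hw, rfl⟩ := List.mem_map.mp hx
        have hk2 : k < w.length := by
          simpa using List.all_eq_true.mp hall w hw
        obtain ⟨hs1, hs2⟩ := (hsuffix w hw).2 hk2
        exact ⟨hs2, hs1⟩
    · have hallF : (t0 :: tts).all (fun w => decide (k < w.length)) = false := by
        simpa using hall
      rw [show (!(((t0 :: tts).map
          (fun words => PySem.Str.strip (PySem.Str.join " " (words.drop k)))).all
            (fun s => s != ""))) = true from by rw [hallEq, hallF]; rfl]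
      rw [if_pos rfl]
      rw [show (decide (k ≠ 0) && (t0 :: tts).all (fun w => decide (k < w.length))) = false from by
        rw [hallF]
        simp]
      rw [if_neg (by simp)]
      exact jhr_eq _ (by simp) hUmem

set_option maxHeartbeats 1000000 in
theorem main_eq (sts : List String) :
    combine_signal_types sts = combine_signal_types_alt sts := by
  unfold combine_signal_types combine_signal_types_alt
  rw [uniq_pair sts [] PySem.Set.empty rfl, uniq_eq]
  have hUmem : ∀ x ∈ PySem.List.dedup
      ((sts.map (fun s => PySem.Str.strip s)).filter (fun s => s != "")),
      x ≠ "" ∧ PySem.Str.strip x = x := by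
    intro x hx
    rw [PySem.List.dedup_eq_ofList] at hx
    have hx2 := (PySem.Set.mem_ofList _ _).mp hx
    obtain ⟨hxm, hxne⟩ := List.mem_filter.mp hx2
    obtain ⟨s0, hs0, rfl⟩ := List.mem_map.mp hxm
    exact ⟨by simpa using hxne, strip_strip s0⟩
  generalize hU : PySem.List.dedup
      ((sts.map (fun s => PySem.Str.strip s)).filter (fun s => s != "")) = U at hUmem ⊢
  cases U with
  | nil => simp
  | cons u us =>
    cases us with
    | nil => simp
    | cons v vs =>
      rw [if_neg (show ¬((u :: v :: vs).length = 0) by simp),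
          if_neg (show ¬((u :: v :: vs).length = 1) by simp),
          if_neg (show ¬((u :: v :: vs).length ≤ 1) by simp)]
      exact post_eq u v vs hUmem

-- ===== VERDICT (by name: the statement is the Claim_ definition above) =====
theorem combine_signal_types_spec : Claim_equal_combine_signal_types := by
  intro sts _
  unfold Spec_combine_signal_types
  exact main_eq sts
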